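-- pv_equiv track=rewrite | github.com/jnluis/IA | Prática/guiao-de-programacao-funcional-jnluis/aula1.py | menor_e_lista
-- ===== SOURCE A (Python) =====
-- def menor_e_lista(lista):
-- 	if lista == []:
-- 		return None,[]
-- 	if len(lista) == 1:
-- 		return lista[0], []
--
-- 	Nmenor, Lrestante = menor_e_lista(lista[1:])
-- 	if Nmenor == None:
-- 		return lista[0]
-- 	elif Nmenor < lista[0]:
-- 		return Nmenor, [lista[0]] + Lrestante
-- 	else:
-- 		return lista[0], [Nmenor] + Lrestante
-- 	pass
-- ===== SOURCE B (Python) =====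
-- def menor_e_lista(lista):
--     # one backward pass of suffix minima, one forward pass pairing each element
--     sufs = []
--     acc = None
--     for x in reversed(lista):
--         acc = x if acc is None or x < acc else acc
--         sufs.append(acc)
--     sufs.reverse()
--     resto = [x if s < x else s for x, s in zip(lista, sufs[1:])]
--     return sufs[0], resto
-- ===== Notes on version B (the rewrite author's own statement) =====
-- stated objective: faster
-- what changed: Replaced the O(n^2) slicing recursion by two linear passes: a backward pass building suffix minima, then a forward pass emitting max(x_i, sufmin_{i+1}) for the rest list.
-- outside the precondition, e.g. on menor_e_lista([]): A returns (None, []), B raises IndexError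
import Mathlib
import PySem

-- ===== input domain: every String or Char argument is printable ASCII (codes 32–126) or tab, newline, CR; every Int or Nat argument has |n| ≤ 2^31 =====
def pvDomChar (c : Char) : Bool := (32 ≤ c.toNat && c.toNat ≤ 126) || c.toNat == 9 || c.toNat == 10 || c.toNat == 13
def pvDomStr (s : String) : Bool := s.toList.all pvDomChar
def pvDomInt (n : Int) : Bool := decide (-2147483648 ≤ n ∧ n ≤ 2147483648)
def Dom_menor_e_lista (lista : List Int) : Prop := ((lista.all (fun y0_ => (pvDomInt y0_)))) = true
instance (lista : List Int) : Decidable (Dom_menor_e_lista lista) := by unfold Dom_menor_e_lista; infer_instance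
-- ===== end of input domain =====

-- B replaces A's O(n^2) slicing recursion with two linear passes (suffix minima, then emit); equivalence proved for nonempty lists.


-- ===== PORT A =====
-- Literal recursion of A.  On [] Python returns (None, []) — not an Int value, so it is
-- outside Pre_ and the port returns a placeholder there.  The 'Nmenor == None' branch of
-- A is unreachable (the recursive call is on a nonempty list) and so has no counterpart.
def menor_e_lista : List Int → Int × List Int
  | [] => (0, [])
  | [x] => (x, [])
  | x :: y :: t =>
      let p := menor_e_lista (y :: t)
      if p.1 < x then (p.1, x :: p.2) else (x, p.1 :: p.2)

-- ===== PORT B =====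
-- B's backward pass: fold over the reversed list, consing the running minimum
-- (Python builds `sufs` by append during the reversed loop, then reverses it).
def pvStep (st : List Int) (x : Int) : List Int :=
  (match st with | [] => x | a :: _ => if x < a then x else a) :: st

def pvSufs (lista : List Int) : List Int := lista.reverse.foldl pvStep []

def menor_e_lista_alt (lista : List Int) : Int × List Int :=
  match pvSufs lista with
  | [] => (0, [])   -- Python: sufs[0] raises IndexError here (lista = []), outside Pre_
  | m :: tail => (m, (lista.zip tail).map (fun p => if p.2 < p.1 then p.1 else p.2))

-- ===== PRECONDITION & SPEC =====
-- Pre_ excludes only the empty list, on which A returns (None, []) — None is not an Int,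
-- so that value is not representable in the declared return type (and B raises there).
def Pre_menor_e_lista (lista : List Int) : Prop := lista ≠ []
instance (lista : List Int) : Decidable (Pre_menor_e_lista lista) := by unfold Pre_menor_e_lista; infer_instance
def pvWitness_menor_e_lista : List Int := [3, 1, 2]

def Spec_menor_e_lista (lista : List Int) (out : Int × List Int) : Prop := out = menor_e_lista_alt lista
instance (lista : List Int) (out : Int × List Int) : Decidable (Spec_menor_e_lista lista out) := by unfold Spec_menor_e_lista; infer_instance

-- ===== CLAIM (what is proved, stated in full; the proofs are below) =====
def Claim_equal_menor_e_lista : Prop := ∀ (lista : List Int), Dom_menor_e_lista lista → Pre_menor_e_lista lista → Spec_menor_e_lista lista (menor_e_lista lista)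

-- ===== LEMMAS AND PROOFS =====

theorem pvSufs_cons (x : Int) (t : List Int) : pvSufs (x :: t) = pvStep (pvSufs t) x := by
  simp [pvSufs, List.foldl_append]

theorem key (t : List Int) : ∀ x : Int, menor_e_lista (x :: t) = menor_e_lista_alt (x :: t) := by
  induction t with
  | nil =>
      intro x
      simp [menor_e_lista, menor_e_lista_alt, pvSufs, pvStep]
  | cons y t' ih =>
      intro x
      have hs : pvSufs (y :: t') = pvStep (pvSufs t') y := pvSufs_cons y t'
      have hs' : pvSufs (x :: y :: t') = pvStep (pvSufs (y :: t')) x := pvSufs_cons x (y :: t')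
      -- name the head of pvSufs (y :: t')
      have hA := ih y
      simp only [menor_e_lista, hA]
      simp only [menor_e_lista_alt, hs', hs, pvStep]
      cases hpt : pvSufs t' with
      | nil =>
          simp only [List.zip_nil_right, List.map_nil]
          split_ifs with h1 h2 h2 <;> simp <;> omega
      | cons a r =>
          simp only []
          split_ifs with h1 h2 h2 <;> simp <;> omega

-- ===== VERDICT (by name: the statement is the Claim_ definition above) =====
theorem menor_e_lista_spec : Claim_equal_menor_e_lista := by
  intro lista _ hpre
  unfold Spec_menor_e_lista
  cases lista with
  | nil => exact absurd rfl hpre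
  | cons x t => exact key t x
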